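-- pv_equiv track=rewrite | github.com/ShriyanshiSrivastava/Data_Structures_For_Hacktoberfest | Hacktoberfest2021/CountSubstrings.py | substr_gen
-- ===== SOURCE A (Python) =====
-- def substr_gen(string):
--
--     substring = 0
--     n = len(string)
--     # List to store all the calculated substrings
--     substr = []
--
--     #loop to append string and get substrings
--     for i in range(n):
--         for j in range(i, n):
--             substr.append(string[i:j])
--
--     substring = len(substr)
--
--     return substring
-- ===== SOURCE B (Python) =====
-- def substr_gen(string):
--     n = len(string)
--     return n * (n + 1) // 2
-- ===== Notes on version B (the rewrite author's own statement) =====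
-- stated objective: faster
-- what changed: Replaced the O(n^2)-iteration/O(n^3)-work nested slicing loops (which only count the n*(n+1)/2 (i,j) pairs) by the closed-form formula n*(n+1)//2.
import Mathlib
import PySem

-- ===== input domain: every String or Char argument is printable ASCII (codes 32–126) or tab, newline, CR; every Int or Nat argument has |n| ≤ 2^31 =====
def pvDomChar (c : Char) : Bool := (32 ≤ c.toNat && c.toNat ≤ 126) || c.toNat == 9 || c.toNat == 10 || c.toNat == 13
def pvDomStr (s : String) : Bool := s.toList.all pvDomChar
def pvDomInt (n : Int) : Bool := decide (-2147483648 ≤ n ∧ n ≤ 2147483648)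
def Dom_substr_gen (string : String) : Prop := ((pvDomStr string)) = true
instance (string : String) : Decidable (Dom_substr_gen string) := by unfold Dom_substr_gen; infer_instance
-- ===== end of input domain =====

-- B replaces A's nested slice-collecting loops by the closed form n*(n+1)//2 (same value, O(1)).

-- ===== PORT A =====
-- literal port: build the list of slices string[i:j] for i in range(n), j in range(i,n), return its length
def substr_gen (string : String) : Int :=
  let n : Int := (string.toList.length : Int)
  let substr : List (List Char) :=
    (PySem.List.pyRange 0 n 1).foldl (fun acc i =>
      (PySem.List.pyRange i n 1).foldl (fun acc2 j =>
        acc2 ++ [PySem.List.slice string.toList (some i) (some j)]) acc) []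
  (substr.length : Int)

-- ===== PORT B =====
def substr_gen_alt (string : String) : Int :=
  let n : Int := (string.toList.length : Int)
  PySem.Int.floordiv (n * (n + 1)) 2

-- ===== PRECONDITION & SPEC =====
def Spec_substr_gen (string : String) (out : Int) : Prop := out = substr_gen_alt string
instance (string : String) (out : Int) : Decidable (Spec_substr_gen string out) := by unfold Spec_substr_gen; infer_instance

-- ===== CLAIM (what is proved, stated in full; the proofs are below) =====
def Claim_equal_substr_gen : Prop := ∀ (string : String), Dom_substr_gen string → Spec_substr_gen string (substr_gen string)

-- ===== LEMMAS AND PROOFS =====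

-- appending one element per inner-loop iteration: length grows by the range's length
theorem pv_len_inner (l : List Int) (f : Int → List Char) (acc : List (List Char)) :
    (l.foldl (fun a j => a ++ [f j]) acc).length = acc.length + l.length := by
  induction l generalizing acc with
  | nil => simp
  | cons x xs ih =>
      simp only [List.foldl_cons]
      rw [ih]
      simp
      omega

-- the outer loop's length: sum of the inner ranges' lengths
theorem pv_len_outer (n : Int) (g : Int → Int → List Char) (l : List Int) (acc : List (List Char)) :
    ((l.foldl (fun acc i =>
        (PySem.List.pyRange i n 1).foldl (fun a j => a ++ [g i j]) acc) acc)).length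
      = acc.length + (l.map (fun i => (n - i).toNat)).sum := by
  induction l generalizing acc with
  | nil => simp
  | cons x xs ih =>
      simp only [List.foldl_cons, List.map_cons, List.sum_cons, ih]
      rw [pv_len_inner, PySem.List.length_pyRange_one]
      omega

theorem pv_sum_map_succ (l : List Nat) (f : Nat → Nat) :
    (l.map (fun k => f k + 1)).sum = (l.map f).sum + l.length := by
  induction l with
  | nil => simp
  | cons x xs ih => simp [ih]; omega

-- Gauss: twice the triangular sum
theorem pv_sum_tri (m : Nat) :
    2 * ((List.range m).map (fun k => m - k)).sum = m * (m + 1) := by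
  induction m with
  | zero => simp
  | succ m ih =>
      rw [List.range_succ]
      have hcong : (List.range m).map (fun k => m + 1 - k)
          = (List.range m).map (fun k => (m - k) + 1) := by
        apply List.map_congr_left
        intro k hk
        have : k < m := List.mem_range.mp hk
        omega
      rw [List.map_append, List.sum_append, hcong, pv_sum_map_succ]
      simp only [List.length_range, List.map_cons, List.map_nil, List.sum_cons,
        List.sum_nil]
      have hx : (m + 1) * (m + 1 + 1) = m * (m + 1) + 2 * (m + 1) := by ring
      rw [hx, ← ih]
      have he : List.map (HSub.hSub m) (List.range m) = List.map (fun k => m - k) (List.range m) := rfl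
      rw [he]
      omega

theorem substr_gen_spec : Claim_equal_substr_gen := by
  intro s _
  unfold Spec_substr_gen
  dsimp only [substr_gen, substr_gen_alt]
  set m := s.toList.length with hm
  rw [pv_len_outer ((m : Int)) (fun i j => PySem.List.slice s.toList (some i) (some j))]
  rw [PySem.List.pyRange_one]
  have h0 : ((m : Int) - 0).toNat = m := by omega
  rw [h0]
  have hs : List.map (fun i => ((m : Int) - i).toNat)
        (List.map (fun (k : Nat) => 0 + (k : Int)) (List.range m))
      = List.map (fun k => m - k) (List.range m) := by
    rw [List.map_map]
    apply List.map_congr_left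
    intro k hk
    have : k < m := List.mem_range.mp hk
    simp
  rw [hs]
  have heven : ((m : Int) * ((m : Int) + 1))
      = 2 * ((((List.range m).map (fun k => m - k)).sum : Nat) : Int) := by
    exact_mod_cast (pv_sum_tri m).symm
  rw [heven]
  have hdiv : PySem.Int.floordiv (2 * ((((List.range m).map (fun k => m - k)).sum : Nat) : Int)) 2
      = ((((List.range m).map (fun k => m - k)).sum : Nat) : Int) := by
    simp [PySem.Int.floordiv, Int.mul_fdiv_cancel_left]
  rw [hdiv]
  simp
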